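-- pv_equiv track=rewrite | github.com/naoki85/python_mahjong | classes/pretreatment.py | have_number_of_pairs_and_pungs
-- ===== SOURCE A (Python) =====
-- import collections as col
--
-- def have_number_of_pairs_and_pungs(my_hand):
--     u"""
--     対子と暗刻の数を数えます。
--     @input my_hand 手牌
--     @return integer
--     [0]で対子の数、[1]で暗刻の数を返します。
--     """
--     number_of_pairs = 0
--     number_of_pungs = 0
--     overlap_counter = col.Counter(my_hand).most_common()
--     for num, cnt in overlap_counter:
--         if cnt == 3:
--             number_of_pungs += 1
--         elif cnt == 2 or cnt == 4:
--             # TODO: 4つある場合も対子とみなしていますが、要検討です。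
--             number_of_pairs += 1
--
--     return number_of_pairs, number_of_pungs
-- ===== SOURCE B (Python) =====
-- def have_number_of_pairs_and_pungs(my_hand):
--     """Sort the hand and scan consecutive runs; a run of 3 is a pung, a run of 2 or 4 a pair."""
--     tiles = sorted(my_hand)
--     pairs = 0
--     pungs = 0
--     i = 0
--     n = len(tiles)
--     while i < n:
--         j = i + 1
--         while j < n and tiles[j] == tiles[i]:
--             j += 1
--         run = j - i
--         if run == 3:
--             pungs += 1
--         elif run == 2 or run == 4:
--             pairs += 1
--         i = j
--     return pairs, pungs
-- ===== Notes on version B (the rewrite author's own statement) =====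
-- stated objective: alternative
-- what changed: Replaces Counter().most_common() plus a classification loop by sorting the hand and scanning consecutive equal runs, classifying each run length directly.
import Mathlib
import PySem

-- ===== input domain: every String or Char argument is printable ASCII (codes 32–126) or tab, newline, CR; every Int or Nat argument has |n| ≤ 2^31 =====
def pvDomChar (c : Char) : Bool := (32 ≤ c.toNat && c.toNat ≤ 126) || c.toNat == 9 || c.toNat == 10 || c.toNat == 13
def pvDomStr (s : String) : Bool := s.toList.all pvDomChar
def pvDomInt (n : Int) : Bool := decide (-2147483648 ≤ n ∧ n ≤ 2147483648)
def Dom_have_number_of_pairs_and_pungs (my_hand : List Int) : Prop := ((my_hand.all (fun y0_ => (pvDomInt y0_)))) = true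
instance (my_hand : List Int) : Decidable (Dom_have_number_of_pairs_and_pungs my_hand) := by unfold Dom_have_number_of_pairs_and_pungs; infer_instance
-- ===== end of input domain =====

-- B replaces Counter().most_common() + classification loop by sort-then-run-scan; an alternative of similar cost.

-- ===== PORT A =====
-- the loop body of A, folded over the (num, cnt) pairs of Counter(my_hand).most_common()
def pvStepA (acc : Int × Int) (p : Int × Int) : Int × Int :=
  if p.2 = 3 then (acc.1, acc.2 + 1)
  else if p.2 = 2 ∨ p.2 = 4 then (acc.1 + 1, acc.2)
  else acc

def have_number_of_pairs_and_pungs (my_hand : List Int) : Int × Int :=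
  -- Counter(my_hand).most_common() = sorted(counter.items(), key=count, reverse=True)
  let overlap_counter :=
    PySem.List.sorted (PySem.Dict.counter my_hand).items (fun p => p.2) true
  overlap_counter.foldl pvStepA (0, 0)

-- ===== PORT B =====
-- the outer while loop of Source B: consume one run of equal tiles, classify its length, continue
def pvRunScan : List Int → Int → Int → Int × Int
  | [], pairs, pungs => (pairs, pungs)
  | x :: rest, pairs, pungs =>
    let run : Int := 1 + ((rest.takeWhile (fun y => y == x)).length : Int)
    let rest' := rest.dropWhile (fun y => y == x)
    if run = 3 then pvRunScan rest' pairs (pungs + 1)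
    else if run = 2 ∨ run = 4 then pvRunScan rest' (pairs + 1) pungs
    else pvRunScan rest' pairs pungs
termination_by s _ _ => s.length
decreasing_by
  all_goals
    simpa using Nat.lt_succ_of_le (List.length_dropWhile_le (fun y => y == x) rest)

def have_number_of_pairs_and_pungs_alt (my_hand : List Int) : Int × Int :=
  pvRunScan (PySem.List.sorted my_hand (fun x => x) false) 0 0

-- ===== PRECONDITION & SPEC =====
def Spec_have_number_of_pairs_and_pungs (my_hand : List Int) (out : Int × Int) : Prop := out = have_number_of_pairs_and_pungs_alt my_hand
instance (my_hand : List Int) (out : Int × Int) : Decidable (Spec_have_number_of_pairs_and_pungs my_hand out) := by unfold Spec_have_number_of_pairs_and_pungs; infer_instance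

-- ===== CLAIM (what is proved, stated in full; the proofs are below) =====
def Claim_equal_have_number_of_pairs_and_pungs : Prop := ∀ (my_hand : List Int), Dom_have_number_of_pairs_and_pungs my_hand → Spec_have_number_of_pairs_and_pungs my_hand (have_number_of_pairs_and_pungs my_hand)

-- ===== LEMMAS AND PROOFS =====

-- both sides count, per distinct tile value, whether its multiplicity is 2/4 (a pair) or 3 (a pung)
def pvC2 (c : Int → Nat) (v : Int) : Bool := decide (c v = 2 ∨ c v = 4)
def pvC3 (c : Int → Nat) (v : Int) : Bool := decide (c v = 3)

theorem pvFoldA (l : List (Int × Int)) (a b : Int) :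
    l.foldl pvStepA (a, b) =
      (a + l.countP (fun p => decide (p.2 = 2 ∨ p.2 = 4)),
       b + l.countP (fun p => decide (p.2 = 3))) := by
  induction l generalizing a b with
  | nil => simp
  | cons p t ih =>
    simp only [List.foldl_cons, List.countP_cons, pvStepA]
    split_ifs with h1 h2 <;> simp_all <;> push_cast <;> ring

theorem pvNotMemDrop (x : Int) (rest : List Int)
    (hx_le : ∀ y ∈ rest, x ≤ y) (hp : rest.Pairwise (· ≤ ·)) :
    x ∉ rest.dropWhile (fun y => y == x) := by
  intro hmem
  cases hre : rest.dropWhile (fun y => y == x) with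
  | nil => simp [hre] at hmem
  | cons hd t =>
    rw [hre] at hmem
    have hhd : ¬ (hd == x) = true := by
      have h0 := List.head_dropWhile_not (fun y => y == x) (l := rest)
      rw [hre] at h0
      simpa using h0 (by simp)
    have hpd : (hd :: t).Pairwise (· ≤ ·) := by
      rw [← hre]; exact hp.sublist (List.dropWhile_sublist _)
    rcases List.mem_cons.mp hmem with h1 | h1
    · exact hhd (by simp [h1])
    · have h2 : hd ≤ x := (List.pairwise_cons.mp hpd).1 x h1
      have h3 : x ≤ hd := hx_le hd (by
        have : hd ∈ rest.dropWhile (fun y => y == x) := by rw [hre]; simp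
        exact (List.dropWhile_sublist _).subset this)
      exact hhd (by simp [le_antisymm h2 h3])

theorem pvRunScan_eq (n : Nat) (s : List Int) (hn : s.length ≤ n)
    (hs : s.Pairwise (· ≤ ·)) (a b : Int) :
    pvRunScan s a b =
      (a + (PySem.Set.ofList s).countP (pvC2 (fun v => s.count v)),
       b + (PySem.Set.ofList s).countP (pvC3 (fun v => s.count v))) := by
  induction n generalizing s a b with
  | zero =>
    have : s = [] := List.length_eq_zero_iff.mp (Nat.le_zero.mp hn)
    subst this; simp [pvRunScan]
  | succ n ih =>
    match s with
    | [] => simp [pvRunScan]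
    | x :: rest =>
      have hx_le : ∀ y ∈ rest, x ≤ y := (List.pairwise_cons.mp hs).1
      have hrestp : rest.Pairwise (· ≤ ·) := (List.pairwise_cons.mp hs).2
      have hsplit : rest.takeWhile (fun y => y == x) ++ rest.dropWhile (fun y => y == x) = rest :=
        List.takeWhile_append_dropWhile
      have htwx : ∀ y ∈ rest.takeWhile (fun y => y == x), y = x := fun y hy => by
        have := List.mem_takeWhile_imp hy; simpa using this
      have hxnot : x ∉ rest.dropWhile (fun y => y == x) := pvNotMemDrop x rest hx_le hrestp
      have hrestp' : (rest.dropWhile (fun y => y == x)).Pairwise (· ≤ ·) :=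
        hrestp.sublist (List.dropWhile_sublist _)
      have hcx : (x :: rest).count x = 1 + (rest.takeWhile (fun y => y == x)).length := by
        rw [List.count_cons_self]
        conv_lhs => rw [← hsplit]
        rw [List.count_append,
            List.count_eq_length.mpr (fun b hb => (htwx b hb).symm),
            List.count_eq_zero.mpr hxnot]
        omega
      have hcv : ∀ v, v ≠ x → (x :: rest).count v = (rest.dropWhile (fun y => y == x)).count v := by
        intro v hv
        have h0 : List.count v (x :: rest) = List.count v rest := by
          simp [Ne.symm hv]
        rw [h0]
        conv_lhs => rw [← hsplit]
        rw [List.count_append, List.count_eq_zero.mpr (fun hm => hv (htwx v hm))]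
        omega
      have hperm : (PySem.Set.ofList (x :: rest) : List Int).Perm
          (x :: PySem.Set.ofList (rest.dropWhile (fun y => y == x))) := by
        refine (List.perm_ext_iff_of_nodup (PySem.Set.nodup_ofList _) ?_).mpr ?_
        · exact List.nodup_cons.mpr
            ⟨fun h => hxnot ((PySem.Set.mem_ofList _ _).mp h), PySem.Set.nodup_ofList _⟩
        · intro v
          simp only [PySem.Set.mem_ofList, List.mem_cons]
          constructor
          · rintro (h1 | h1)
            · exact Or.inl h1
            · rw [← hsplit] at h1
              rcases List.mem_append.mp h1 with h2 | h2
              · exact Or.inl (htwx v h2)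
              · exact Or.inr h2
          · rintro (h1 | h1)
            · exact Or.inl h1
            · refine Or.inr ?_
              rw [← hsplit]
              exact List.mem_append_right _ h1
      have hcongr2 : (PySem.Set.ofList (rest.dropWhile (fun y => y == x)) : List Int).countP
            (pvC2 (fun v => (x :: rest).count v))
          = (PySem.Set.ofList (rest.dropWhile (fun y => y == x))).countP
            (pvC2 (fun v => (rest.dropWhile (fun y => y == x)).count v)) := by
        refine List.countP_congr (fun v hv => ?_)
        have hvm : v ∈ rest.dropWhile (fun y => y == x) := (PySem.Set.mem_ofList _ _).mp hv
        have hvx : v ≠ x := fun h => hxnot (by rwa [h] at hvm)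
        simp [pvC2, hcv v hvx]
      have hcongr3 : (PySem.Set.ofList (rest.dropWhile (fun y => y == x)) : List Int).countP
            (pvC3 (fun v => (x :: rest).count v))
          = (PySem.Set.ofList (rest.dropWhile (fun y => y == x))).countP
            (pvC3 (fun v => (rest.dropWhile (fun y => y == x)).count v)) := by
        refine List.countP_congr (fun v hv => ?_)
        have hvm : v ∈ rest.dropWhile (fun y => y == x) := (PySem.Set.mem_ofList _ _).mp hv
        have hvx : v ≠ x := fun h => hxnot (by rwa [h] at hvm)
        simp [pvC3, hcv v hvx]
      have hlen : (rest.dropWhile (fun y => y == x)).length ≤ n := by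
        have h1 := List.length_dropWhile_le (fun y => y == x) rest
        simp at hn; omega
      have hC2 := hperm.countP_eq (pvC2 (fun v => (x :: rest).count v))
      have hC3 := hperm.countP_eq (pvC3 (fun v => (x :: rest).count v))
      rw [List.countP_cons, hcongr2] at hC2
      rw [List.countP_cons, hcongr3] at hC3
      have ih' := ih (rest.dropWhile (fun y => y == x)) hlen hrestp'
      rw [pvRunScan]
      split_ifs with h1 h2
      · -- run = 3
        have hcnt : (x :: rest).count x = 3 := by omega
        have hb2 : pvC2 (fun v => (x :: rest).count v) x = false := by simp [pvC2, hcnt]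
        have hb3 : pvC3 (fun v => (x :: rest).count v) x = true := by simp [pvC3, hcnt]
        rw [hb2] at hC2
        rw [hb3] at hC3
        simp at hC2 hC3
        rw [ih', hC2, hC3]
        simp only [Prod.mk.injEq]
        refine ⟨?_, ?_⟩ <;> push_cast <;> ring
      · -- run = 2 or 4
        have hcnt : (x :: rest).count x = 2 ∨ (x :: rest).count x = 4 := by
          rcases h2 with h | h
          · left; omega
          · right; omega
        have hb2 : pvC2 (fun v => (x :: rest).count v) x = true := by
          simpa [pvC2] using hcnt
        have hb3 : pvC3 (fun v => (x :: rest).count v) x = false := by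
          rcases hcnt with h | h <;> simp [pvC3, h]
        rw [hb2] at hC2
        rw [hb3] at hC3
        simp at hC2 hC3
        rw [ih', hC2, hC3]
        simp only [Prod.mk.injEq]
        refine ⟨?_, ?_⟩ <;> push_cast <;> ring
      · -- other run lengths
        rw [not_or] at h2
        have hcnt : (x :: rest).count x ≠ 2 ∧ (x :: rest).count x ≠ 3 ∧ (x :: rest).count x ≠ 4 := by
          refine ⟨by omega, by omega, by omega⟩
        have hb2 : pvC2 (fun v => (x :: rest).count v) x = false := by
          simp only [pvC2, decide_eq_false_iff_not]
          omega
        have hb3 : pvC3 (fun v => (x :: rest).count v) x = false := by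
          simp only [pvC3, decide_eq_false_iff_not]
          omega
        rw [hb2] at hC2
        rw [hb3] at hC3
        simp at hC2 hC3
        rw [ih', hC2, hC3]

theorem have_number_of_pairs_and_pungs_A_canonical (xs : List Int) :
    have_number_of_pairs_and_pungs xs =
      (((PySem.Set.ofList xs).countP (pvC2 (fun v => xs.count v)) : Int),
       ((PySem.Set.ofList xs).countP (pvC3 (fun v => xs.count v)) : Int)) := by
  unfold have_number_of_pairs_and_pungs
  rw [pvFoldA]
  have hperm : (PySem.List.sorted (PySem.Dict.counter xs).items (fun p : Int × Int => p.2) true).Perm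
      (PySem.Dict.counter xs).items := PySem.List.sorted_perm _ _ _
  have a2 : (PySem.Dict.counter xs).items.countP (fun p : Int × Int => decide (p.2 = 2 ∨ p.2 = 4))
      = (PySem.Set.ofList xs).countP (pvC2 (fun v => xs.count v)) := by
    rw [PySem.Dict.items_counter, List.countP_map]
    exact List.countP_congr (fun k _ => by
      simp only [Function.comp_apply, pvC2, decide_eq_true_eq]
      omega)
  have a3 : (PySem.Dict.counter xs).items.countP (fun p : Int × Int => decide (p.2 = 3))
      = (PySem.Set.ofList xs).countP (pvC3 (fun v => xs.count v)) := by
    rw [PySem.Dict.items_counter, List.countP_map]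
    exact List.countP_congr (fun k _ => by
      simp only [Function.comp_apply, pvC3, decide_eq_true_eq]
      omega)
  rw [hperm.countP_eq, hperm.countP_eq, a2, a3]
  simp

theorem have_number_of_pairs_and_pungs_B_canonical (xs : List Int) :
    have_number_of_pairs_and_pungs_alt xs =
      (((PySem.Set.ofList xs).countP (pvC2 (fun v => xs.count v)) : Int),
       ((PySem.Set.ofList xs).countP (pvC3 (fun v => xs.count v)) : Int)) := by
  unfold have_number_of_pairs_and_pungs_alt
  have hp : (PySem.List.sorted xs (fun x => x) false).Perm xs := PySem.List.sorted_perm _ _ _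
  have hsorted : (PySem.List.sorted xs (fun x => x) false).Pairwise (· ≤ ·) := by
    simpa using PySem.List.sorted_pairwise xs (fun x => x)
  have hcnt : ∀ v : Int, (PySem.List.sorted xs (fun x => x) false).count v = xs.count v :=
    fun v => hp.count_eq v
  have hsetperm : (PySem.Set.ofList (PySem.List.sorted xs (fun x => x) false) : List Int).Perm
      (PySem.Set.ofList xs) := by
    refine (List.perm_ext_iff_of_nodup (PySem.Set.nodup_ofList _) (PySem.Set.nodup_ofList _)).mpr ?_
    intro v
    rw [PySem.Set.mem_ofList, PySem.Set.mem_ofList, hp.mem_iff]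
  have e2 : (PySem.Set.ofList (PySem.List.sorted xs (fun x => x) false) : List Int).countP
        (pvC2 (fun v => (PySem.List.sorted xs (fun x => x) false).count v))
      = (PySem.Set.ofList xs).countP (pvC2 (fun v => xs.count v)) :=
    (List.countP_congr (fun v _ => by simp [pvC2, hcnt v])).trans
      (hsetperm.countP_eq _)
  have e3 : (PySem.Set.ofList (PySem.List.sorted xs (fun x => x) false) : List Int).countP
        (pvC3 (fun v => (PySem.List.sorted xs (fun x => x) false).count v))
      = (PySem.Set.ofList xs).countP (pvC3 (fun v => xs.count v)) :=
    (List.countP_congr (fun v _ => by simp [pvC3, hcnt v])).trans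
      (hsetperm.countP_eq _)
  rw [pvRunScan_eq (PySem.List.sorted xs (fun x => x) false).length _ le_rfl hsorted 0 0, e2, e3]
  simp

-- ===== VERDICT (by name: the statement is the Claim_ definition above) =====
theorem have_number_of_pairs_and_pungs_spec : Claim_equal_have_number_of_pairs_and_pungs := by
  intro xs _
  unfold Spec_have_number_of_pairs_and_pungs
  rw [have_number_of_pairs_and_pungs_A_canonical, have_number_of_pairs_and_pungs_B_canonical]
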